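-- pv_equiv track=rewrite | github.com/klaus94/2048 | 2048_Konsole.py | entferneNull
-- ===== SOURCE A (Python) =====
-- def entferneNull(hilfsfeld):
-- 	for start in [3,2,1]:							#Ende der Liste
-- 		if (hilfsfeld[start] == 0):
-- 			i = start
-- 			while (hilfsfeld[i] == 0 and i > 0):	#so lange nach links, bis Nicht-Null-Feld oder Anfang
-- 				i -= 1
-- 			hilfsfeld[start] = hilfsfeld[i]
-- 			hilfsfeld[i] = 0
-- 	return hilfsfeld
-- ===== SOURCE B (Python) =====
-- def entferneNull(hilfsfeld):
--     nonzeros = [hilfsfeld[i] for i in range(4) if hilfsfeld[i] != 0]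
--     hilfsfeld[:4] = [0] * (4 - len(nonzeros)) + nonzeros
--     return hilfsfeld
-- ===== Notes on version B (the rewrite author's own statement) =====
-- stated objective: simpler
-- what changed: Replaces A's right-to-left selection-swap loops with a one-shot filter-and-pad: collect the nonzeros of the first four cells and write back zeros followed by them.
import Mathlib
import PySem

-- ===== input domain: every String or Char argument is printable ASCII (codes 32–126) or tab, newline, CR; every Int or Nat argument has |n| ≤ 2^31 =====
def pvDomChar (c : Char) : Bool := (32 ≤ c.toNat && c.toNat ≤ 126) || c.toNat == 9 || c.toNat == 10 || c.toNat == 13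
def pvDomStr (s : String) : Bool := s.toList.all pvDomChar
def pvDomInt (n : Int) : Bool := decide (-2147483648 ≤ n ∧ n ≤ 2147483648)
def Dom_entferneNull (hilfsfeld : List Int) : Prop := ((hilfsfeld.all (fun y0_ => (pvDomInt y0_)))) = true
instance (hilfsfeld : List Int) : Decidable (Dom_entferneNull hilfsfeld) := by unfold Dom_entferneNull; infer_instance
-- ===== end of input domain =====

-- B replaces A's right-to-left selection swaps with a one-shot filter-and-pad of the first
-- four cells (same in-place result in Python; the equivalence proved is about the return value).

-- ===== PORT A =====
-- the inner while loop: from index i walk left while the cell is 0 and i > 0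
def pvFindA (h : List Int) : Nat → Nat
  | 0 => 0
  | i + 1 => if h.getD (i + 1) 0 = 0 then pvFindA h i else i + 1

-- one iteration of the for-loop body at index `start`
def pvStepA (h : List Int) (start : Nat) : List Int :=
  if h.getD start 0 = 0 then
    let i := pvFindA h start
    (h.set start (h.getD i 0)).set i 0
  else h

def entferneNull (hilfsfeld : List Int) : List Int :=
  [3, 2, 1].foldl pvStepA hilfsfeld

-- ===== PORT B =====
def entferneNull_alt (hilfsfeld : List Int) : List Int :=
  let nonzeros := (List.range 4).filterMap
    (fun i => if hilfsfeld.getD i 0 ≠ 0 then some (hilfsfeld.getD i 0) else none)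
  List.replicate (4 - nonzeros.length) 0 ++ nonzeros ++ hilfsfeld.drop 4

-- ===== PRECONDITION & SPEC =====
-- A indexes cells 1..3 unconditionally, so it raises IndexError on lists shorter than 4.
def Pre_entferneNull (hilfsfeld : List Int) : Prop := 4 ≤ hilfsfeld.length
instance (hilfsfeld : List Int) : Decidable (Pre_entferneNull hilfsfeld) := by unfold Pre_entferneNull; infer_instance
def pvWitness_entferneNull : List Int := [0, 7, 0, 2]

def Spec_entferneNull (hilfsfeld : List Int) (out : List Int) : Prop := out = entferneNull_alt hilfsfeld
instance (hilfsfeld : List Int) (out : List Int) : Decidable (Spec_entferneNull hilfsfeld out) := by unfold Spec_entferneNull; infer_instance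

-- ===== CLAIM (what is proved, stated in full; the proofs are below) =====
def Claim_equal_entferneNull : Prop := ∀ (hilfsfeld : List Int), Dom_entferneNull hilfsfeld → Pre_entferneNull hilfsfeld → Spec_entferneNull hilfsfeld (entferneNull hilfsfeld)

-- ===== LEMMAS AND PROOFS =====
-- core case analysis on a length-4 prefix: both algorithms only touch the first four cells
theorem entferneNull_four (a b c d : Int) (rest : List Int) :
    entferneNull (a :: b :: c :: d :: rest) = entferneNull_alt (a :: b :: c :: d :: rest) := by
  by_cases ha : a = 0 <;> by_cases hb : b = 0 <;> by_cases hc : c = 0 <;> by_cases hd : d = 0 <;>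
    simp [entferneNull, entferneNull_alt, pvStepA, pvFindA, ha, hb, hc, hd, List.getD, List.range_succ]

-- ===== VERDICT (by name: the statement is the Claim_ definition above) =====
theorem entferneNull_spec : Claim_equal_entferneNull := by
  intro h _ hpre
  unfold Spec_entferneNull
  match h, hpre with
  | a :: b :: c :: d :: rest, _ => exact entferneNull_four a b c d rest
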